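/-
  THE CONTRACTS OF THE SANITIZER'S RUNTIME, as the unit statements use them. The `Spec`s and the fast-path form of the eight small
  check routines are Asan/Runtime.lean's and Asan/Check.lean's (THE LEAN SPEC IS THE CONTRACT: design/CONTRACTS.md entries 1–3, 5–7,
  12, 16, 19–21, 35, 38, 69–72); here: the runtime record of THIS image, and the frame sizes as `vspec` rewrite rules.

      __asan_{load,store}{1,2,4,8}_noabort     NO `Spec`: the statement of each is `Asan.SmallCheck Lay μ WayInv (CodeOK u₀) clob K entry`
                                               with clob = [rax, rdx] (K = 1), [rax, rcx, rdx] (K = 2, 4, 8)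
      __asan_{load,store}16_noabort            `Asan.check16Spec`       __asan_storeN_noabort   `Asan.checkNSpec`
      range_bad                                `Asan.rangeBadSpec`
      arena_unpoison / arena_poison            `Asan.arenaUnpoisonSpec` / `Asan.arenaPoisonSpec`
      __asan_register_globals / _sub_I_65535_1 / run_ctors      `Asan.registerGlobalsSpec rt` / `Asan.ctorSpec rt` / `Asan.runCtorsSpec rt`
      __asan_report                            NO UNIT: it is never called in a proved run ("rip ≠ L.report at every step" IS the
                                               theorem); nothing is proved about its body
-/
import Vorbis.Spec.Basic
namespace Vorbis.Spec
open X86 X86.User Asan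

/-- **The runtime of this image**: the entry points of vorbis_f.sym (Vorbis/Symbols.lean) and the descriptor table of the six
registered globals (Vorbis/Globals.lean). -/
def rt : Runtime := Vorbis.Globals.runtime Vorbis.symbols.rt

@[vspec] theorem rangeBadSpec_frame : rangeBadSpec.frame = 0 := id rfl
@[vspec] theorem rangeBadSpec_writes (u : State) : rangeBadSpec.writes u = [] := id rfl
@[vspec] theorem check16Spec_frame : check16Spec.frame = 16 := id rfl
@[vspec] theorem check16Spec_writes (u : State) : check16Spec.writes u = [] := id rfl
@[vspec] theorem checkNSpec_frame : checkNSpec.frame = 32 := id rfl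
@[vspec] theorem checkNSpec_writes (u : State) : checkNSpec.writes u = [] := id rfl
@[vspec] theorem arenaUnpoisonSpec_frame : arenaUnpoisonSpec.frame = 0 := id rfl
@[vspec] theorem arenaPoisonSpec_frame : arenaPoisonSpec.frame = 0 := id rfl
@[vspec] theorem registerGlobalsSpec_frame (R : Runtime) : (registerGlobalsSpec R).frame = 0 := id rfl
@[vspec] theorem ctorSpec_frame (R : Runtime) : (ctorSpec R).frame = 16 := id rfl
@[vspec] theorem runCtorsSpec_frame (R : Runtime) : (runCtorsSpec R).frame = 32 := id rfl

/-- The entry points of the runtime record are the labels (so that a statement may cite either). -/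
theorem rt_rangeBad : rt.sym.rangeBad = L.range_bad.entry := by decide

/-! ### The footprints of `arena_poison` / `arena_unpoison` as literal lists

NOT `@[vspec]` (accepted allocator proofs rewrite with their own copies after `v_after_call`): use
`simp only [arenaPoisonSpec_writes, Asan.shadowSpan] at w_same` after `v_after_call`. -/

/-- The footprint of `arena_unpoison(rdi = a, rsi = n)` as a literal list: the shadow of `[a, a + n)`. -/
theorem arenaUnpoisonSpec_writes (u : State) :
    arenaUnpoisonSpec.writes u = [shadowSpan (u.reg .rdi).toNat ((u.reg .rdi).toNat + (u.reg .rsi).toNat)] := id rfl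

/-- The footprint of `arena_poison(rdi = a, rsi = n)` as a literal list: the shadow of `[a, a + n)`. Written by setup_temp_free
(`arenaPoison_writes`). -/
theorem arenaPoisonSpec_writes (u : State) :
    arenaPoisonSpec.writes u = [shadowSpan (u.reg .rdi).toNat ((u.reg .rdi).toNat + (u.reg .rsi).toNat)] := id rfl

end Vorbis.Spec
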